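-- pv_equiv track=rewrite | github.com/tensorrent/computational-tensegrity | scripts/compute_all.py | isqrt_q40
-- ===== SOURCE A (Python) =====
-- Q = 40
--
-- def isqrt_q40(p):
--     """Integer sqrt in Q40."""
--     P = p << (2 * Q)  # p * 2^80
--     if P == 0:
--         return 0
--     g = 1 << ((P.bit_length() + 1) // 2)
--     while True:
--         g1 = (g + P // g) // 2
--         if g1 >= g:
--             break
--         g = g1
--     return g
-- ===== SOURCE B (Python) =====
-- Q = 40
--
-- def isqrt_q40(p):
--     """Integer sqrt in Q40, by the binary digit-by-digit (long-division) method."""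
--     if p < 0:
--         raise ValueError("isqrt_q40 of negative value")
--     P = p << (2 * Q)
--     if P == 0:
--         return 0
--     bit = 1 << (2 * ((P.bit_length() - 1) // 2))  # highest power of 4 <= P
--     res = 0
--     while bit:
--         if P >= res + bit:
--             P -= res + bit
--             res = (res >> 1) + bit
--         else:
--             res >>= 1
--         bit >>= 2
--     return res
-- ===== Notes on version B (the rewrite author's own statement) =====
-- stated objective: alternative
-- what changed: Replaces A's Newton-iteration loop with the binary digit-by-digit (long-division) integer square root, accumulating the root one bit at a time from the highest power of 4 below P instead of iterating g := (g + P//g)//2 to a fixed point.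
-- outside the precondition, e.g. on isqrt_q40(-5): A returns -1243197806406, B raises ValueError
import Mathlib
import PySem

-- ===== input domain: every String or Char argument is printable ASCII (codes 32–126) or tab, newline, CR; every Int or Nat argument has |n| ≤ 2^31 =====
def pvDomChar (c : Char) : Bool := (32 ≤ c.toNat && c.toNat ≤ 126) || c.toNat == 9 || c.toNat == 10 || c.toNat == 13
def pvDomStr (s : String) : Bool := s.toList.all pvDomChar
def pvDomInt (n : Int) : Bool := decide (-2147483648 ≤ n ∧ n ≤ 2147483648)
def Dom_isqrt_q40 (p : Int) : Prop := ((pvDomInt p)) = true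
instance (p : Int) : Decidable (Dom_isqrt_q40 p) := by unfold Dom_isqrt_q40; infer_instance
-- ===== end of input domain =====

-- B replaces A's Newton iteration by the binary digit-by-digit (long-division) integer
-- square root; equivalence is proved on nonnegative p (B raises ValueError on negative p).

-- ===== PORT A =====
-- A's `while True` Newton loop; the `0 < g` test is only a totality guard: for the
-- inputs admitted by Pre_ the guess stays positive throughout (proved below).
def pvNewtonI (P g : Int) : Int :=
  if _hg : 0 < g then
    let g1 := PySem.Int.floordiv (g + PySem.Int.floordiv P g) 2
    if _h : g1 < g then pvNewtonI P g1 else g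
  else g
termination_by g.toNat
decreasing_by omega

def isqrt_q40 (p : Int) : Int :=
  let P := p * 2 ^ 80                                 -- p << (2*Q), Q = 40: n << k = n * 2^k, exact on all ints
  if P = 0 then 0
  else pvNewtonI P ((2 : Int) ^ ((PySem.Int.bitLength P + 1) / 2))  -- 1 << k = 2^k, exact

-- ===== PORT B =====
-- the digit loop: place one result bit per iteration, from `bit` (a power of 4) down
def pvDigitLoop (num res bit : Nat) : Nat :=
  if _h : bit = 0 then res
  else if res + bit ≤ num then pvDigitLoop (num - (res + bit)) (res / 2 + bit) (bit / 4)
  else pvDigitLoop num (res / 2) (bit / 4)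
termination_by bit
decreasing_by all_goals omega

def isqrt_q40_alt (p : Int) : Int :=
  if p < 0 then 0                                     -- Python B raises ValueError here (outside Pre_)
  else
    let P := p.toNat * 2 ^ 80                       -- p << (2*Q): n << k = n * 2^k, exact
    if P = 0 then 0
    else ((pvDigitLoop P 0 (2 ^ (2 * ((PySem.Int.bitLength (P : Int) - 1) / 2)))) : Int)  -- 1 << k = 2^k, exact

-- ===== PRECONDITION & SPEC =====
-- Pre_ excludes negative p, where A's Newton loop returns an accidental negative value
-- (sqrt of a negative is undefined) while B, like math.isqrt, raises ValueError.
def Pre_isqrt_q40 (p : Int) : Prop := 0 ≤ p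
instance (p : Int) : Decidable (Pre_isqrt_q40 p) := by unfold Pre_isqrt_q40; infer_instance
def pvWitness_isqrt_q40 : Int := 5

def Spec_isqrt_q40 (p : Int) (out : Int) : Prop := out = isqrt_q40_alt p
instance (p : Int) (out : Int) : Decidable (Spec_isqrt_q40 p out) := by unfold Spec_isqrt_q40; infer_instance

-- ===== CLAIM (what is proved, stated in full; the proofs are below) =====
def Claim_equal_isqrt_q40 : Prop := ∀ (p : Int), Dom_isqrt_q40 p → Pre_isqrt_q40 p → Spec_isqrt_q40 p (isqrt_q40 p)

-- ===== LEMMAS AND PROOFS =====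

-- A's loop from a Nat state is exactly `Nat.sqrt.iter`
theorem pvNewtonI_eq_iter (n : Nat) : ∀ g : Nat, pvNewtonI (n : Int) (g : Int) = ((Nat.sqrt.iter n g : Nat) : Int) := by
  intro g
  induction g using Nat.strong_induction_on with
  | _ g ih =>
    rw [pvNewtonI, Nat.sqrt.iter]
    rcases Nat.eq_zero_or_pos g with hg | hg
    · subst hg; simp
    · have hgpos : (0 : Int) < (g : Int) := by exact_mod_cast hg
      rw [dif_pos hgpos]
      have hdiv1 : PySem.Int.floordiv (n : Int) (g : Int) = ((n / g : Nat) : Int) :=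
        PySem.Int.floordiv_natCast n g
      have hsum : (g : Int) + ((n / g : Nat) : Int) = ((g + n / g : Nat) : Int) := by push_cast; ring
      have hdiv2 : PySem.Int.floordiv ((g + n / g : Nat) : Int) (2 : Int) = (((g + n / g) / 2 : Nat) : Int) := by
        exact_mod_cast PySem.Int.floordiv_natCast (g + n / g) 2
      simp only [hdiv1, hsum, hdiv2]
      by_cases h : (g + n / g) / 2 < g
      · rw [dif_pos (show ((((g + n / g) / 2 : Nat)) : Int) < (g : Int) by exact_mod_cast h), dif_pos h]
        exact ih _ h
      · rw [dif_neg (show ¬ ((((g + n / g) / 2 : Nat)) : Int) < (g : Int) by exact_mod_cast h), dif_neg h]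

theorem pvDigitLoop_zero (num res : Nat) : pvDigitLoop num res 0 = res := by
  rw [pvDigitLoop]; simp

-- one digit step of the loop, with the scale d (= 2^j) as a plain variable
theorem pvDigitStep (d s num : Nat)
    (hrec : ∀ s' num', num' < 4 * d * (s' + d) → pvDigitLoop num' (2 * s' * d) (d * d) = Nat.sqrt (num' + s' * s'))
    (h : num < 8 * d * (s + 2 * d)) :
    pvDigitLoop num (2 * s * (2 * d)) ((2 * d) * (2 * d)) = Nat.sqrt (num + s * s) := by
  rcases Nat.eq_zero_or_pos d with hd | hd
  · subst hd; simp at h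
  rw [pvDigitLoop, dif_neg (by positivity)]
  have hbit4 : (2 * d) * (2 * d) / 4 = d * d := by
    rw [show (2 * d) * (2 * d) = (d * d) * 4 by ring, Nat.mul_div_cancel _ (by norm_num)]
  have hres2 : (2 * s * (2 * d)) / 2 = 2 * s * d := by
    rw [show 2 * s * (2 * d) = (2 * s * d) * 2 by ring, Nat.mul_div_cancel _ (by norm_num)]
  by_cases hc : 2 * s * (2 * d) + (2 * d) * (2 * d) ≤ num
  · rw [if_pos hc, hbit4, hres2,
      show 2 * s * d + (2 * d) * (2 * d) = 2 * (s + 2 * d) * d by ring]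
    have hcond : num - (2 * s * (2 * d) + (2 * d) * (2 * d)) < 4 * d * ((s + 2 * d) + d) := by
      rw [Nat.sub_lt_iff_lt_add hc]
      exact lt_of_lt_of_le h (le_of_eq (by ring))
    rw [hrec (s + 2 * d) _ hcond]
    congr 1
    zify [hc]
    ring
  · rw [if_neg hc, hbit4, hres2]
    exact hrec s num (lt_of_lt_of_le (Nat.lt_of_not_le hc) (le_of_eq (by ring)))

-- digit-loop invariant: starting at bit 4^j = 2^j*2^j with partial root s (scaled as
-- res = 2*s*2^j) and remainder num, the loop computes the integer square root of num + s²
theorem pvDigitLoop_sqrt : ∀ (j s num : Nat), num < 4 * 2 ^ j * (s + 2 ^ j) →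
    pvDigitLoop num (2 * s * 2 ^ j) (2 ^ j * 2 ^ j) = Nat.sqrt (num + s * s) := by
  intro j
  induction j with
  | zero =>
    intro s num h
    simp only [pow_zero, mul_one] at h ⊢
    rw [pvDigitLoop, dif_neg (by norm_num)]
    by_cases hc : 2 * s + 1 ≤ num
    · rw [if_pos (by omega), show (1 : Nat) / 4 = 0 by norm_num,
        show (2 * s) / 2 + 1 = s + 1 by omega, pvDigitLoop_zero]
      rw [Nat.eq_sqrt]
      constructor
      · nlinarith
      · nlinarith
    · rw [if_neg (by omega), show (1 : Nat) / 4 = 0 by norm_num,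
        show (2 * s) / 2 = s by omega, pvDigitLoop_zero]
      rw [Nat.eq_sqrt]
      constructor
      · nlinarith
      · nlinarith
  | succ j ih =>
    intro s num h
    have e : (2 : Nat) ^ (j + 1) = 2 * 2 ^ j := by ring
    rw [e]
    exact pvDigitStep (2 ^ j) s num (fun s' num' h' => ih s' num' h')
      (lt_of_lt_of_le (by rw [e] at h; exact h) (le_of_eq (by ring)))

-- A on ↑n (n > 0) computes ↑(Nat.sqrt (n * 2^80))
theorem pvA_eq_sqrt (n : Nat) (hn : 0 < n) :
    isqrt_q40 (n : Int) = ((Nat.sqrt (n * 2 ^ 80) : Nat) : Int) := by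
  have hN : 0 < n * 2 ^ 80 := by positivity
  rw [isqrt_q40]
  have hP : ((n : Int) * 2 ^ 80) = ((n * 2 ^ 80 : Nat) : Int) := by push_cast; ring
  simp only [hP]
  rw [if_neg (by exact_mod_cast hN.ne')]
  set N := n * 2 ^ 80 with hNdef
  set k := PySem.Int.bitLength (N : Int) with hk
  have hone : ((2 : Int) ^ ((k + 1) / 2)) = (((2 : Nat) ^ ((k + 1) / 2) : Nat) : Int) := by push_cast; ring
  rw [hone, pvNewtonI_eq_iter]
  congr 1
  set g := (2 : Nat) ^ ((k + 1) / 2) with hg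
  have hlt : N < 2 ^ k := by
    have := PySem.Int.lt_two_pow_bitLength (N : Int)
    simpa [← hk] using this
  have hinit : N < (g + 1) * (g + 1) := by
    have h1 : 2 ^ k ≤ g * g := by
      rw [hg, ← pow_add]
      exact Nat.pow_le_pow_right (by norm_num) (by omega)
    nlinarith
  rw [Nat.eq_sqrt]
  exact ⟨Nat.sqrt.iter_sq_le N g, Nat.sqrt.lt_iter_succ_sq N g hinit⟩

-- B on ↑n (n > 0) computes ↑(Nat.sqrt (n * 2^80))
theorem pvB_eq_sqrt (n : Nat) (hn : 0 < n) :
    isqrt_q40_alt (n : Int) = ((Nat.sqrt (n * 2 ^ 80) : Nat) : Int) := by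
  have hN : 0 < n * 2 ^ 80 := by positivity
  rw [isqrt_q40_alt]
  rw [if_neg (by exact_mod_cast Int.not_lt.mpr (Int.natCast_nonneg n)), Int.toNat_natCast]
  rw [if_neg hN.ne']
  set N := n * 2 ^ 80 with hNdef
  set k := PySem.Int.bitLength (N : Int) with hk
  have hlt : N < 2 ^ k := by
    have := PySem.Int.lt_two_pow_bitLength (N : Int)
    simpa [← hk] using this
  have hk1 : 1 ≤ k := by
    by_contra hcon
    have hz : k = 0 := by omega
    rw [hz] at hlt; omega
  set j := (k - 1) / 2 with hj
  have hbit : (2 : Nat) ^ (2 * j) = 2 ^ j * 2 ^ j := by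
    rw [two_mul, pow_add]
  rw [hbit, show (0 : Nat) = 2 * 0 * 2 ^ j by ring, pvDigitLoop_sqrt j 0 N ?_]
  · norm_num
  · have h2 : 4 * 2 ^ j * ((0 : Nat) + 2 ^ j) = 2 ^ (2 * j + 2) := by
      rw [Nat.zero_add, two_mul, pow_add]; ring
    rw [h2]
    calc N < 2 ^ k := hlt
      _ ≤ 2 ^ (2 * j + 2) := Nat.pow_le_pow_right (by norm_num) (by omega)

-- ===== VERDICT (by name: the statement is the Claim_ definition above) =====
theorem isqrt_q40_spec : Claim_equal_isqrt_q40 := by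
  intro p _ hpre
  unfold Spec_isqrt_q40
  obtain ⟨n, rfl⟩ := Int.eq_ofNat_of_zero_le hpre
  rcases Nat.eq_zero_or_pos n with hn | hn
  · subst hn; decide
  · rw [pvA_eq_sqrt n hn, pvB_eq_sqrt n hn]
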